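-- pv_equiv track=rewrite | github.com/clemdcz/Crypto | Crypto/monge2.py | monge2
-- ===== SOURCE A (Python) =====
-- def monge2(mot):
--     """// ---------------- DEBUT EN TETE --------------------------------------//
-- // NOM :                    codage monge2                        //
-- //                                                                      //
-- // AUTEURS : E.chassagne B.balos C.da cruz E.bertrand                   //
-- //                                                                      //
-- // VERSION :    1.3                                  novembre 2020     //
-- // HISTORIQUE : Aucun                                                   //
-- //                                                                      //
-- // ENTREES :                                                            //
-- //    cap      texte en clair à coder                                    //                                                                      //                                                 //
-- // SORTIES :                                                            //
-- //    texte    le texte codé par monge2                          //                                                                      //                                                                      //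
-- // MODIFIEES :                                                          //
-- //                                                                      //
-- // LOCALES :                                                            //
-- //             alphabet et remplacement                                 //
-- //                                                                      //
-- // FONCTIONS APPELEES :                                                 //
-- //                                                                      //
-- // ALGO - REFERENCES :                                                  //
-- //                                                                      //
-- // ---------------- FIN EN TETE ----------------------------------------//
--
--     """
--     motclaire = list(mot)
--     longeur = len(motclaire)
--     ordre= []
--     motcode = []
--     moitier = int(longeur/2)
--     chifre = longeur
--     if longeur%2 == 1:
--         chifre = chifre -1
--         for i in range (0, moitier):
--             ordre.append(chifre)
--             chifre = chifre -2
--         for g in range (1, longeur+1, 2):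
--                 ordre.append(g)
--         ordre.reverse
--     else:
--         for i in range (0, moitier):
--             ordre.append(chifre)
--             chifre = chifre -2
--         for g in range (1, longeur+1, 2):
--                 ordre.append(g)
--         ordre.reverse
--     for k in range (0, longeur):
--         numero = ordre[k] -1
--         motcode.append(motclaire[numero])
--     textecode = "".join(reversed(motcode))
--     return textecode
-- ===== SOURCE B (Python) =====
-- def monge2(mot):
--     # Monge transposition in one expression: even-indexed characters in reverse
--     # order, then odd-indexed characters in order.
--     return mot[::2][::-1] + mot[1::2]
-- ===== Notes on version B (the rewrite author's own statement) =====
-- stated objective: simpler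
-- what changed: Replaces the permutation-table construction (two index-building loops, an indexed gather loop over it, and a final reversal) with the closed-form slice expression mot[::2][::-1] + mot[1::2].
import Mathlib
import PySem

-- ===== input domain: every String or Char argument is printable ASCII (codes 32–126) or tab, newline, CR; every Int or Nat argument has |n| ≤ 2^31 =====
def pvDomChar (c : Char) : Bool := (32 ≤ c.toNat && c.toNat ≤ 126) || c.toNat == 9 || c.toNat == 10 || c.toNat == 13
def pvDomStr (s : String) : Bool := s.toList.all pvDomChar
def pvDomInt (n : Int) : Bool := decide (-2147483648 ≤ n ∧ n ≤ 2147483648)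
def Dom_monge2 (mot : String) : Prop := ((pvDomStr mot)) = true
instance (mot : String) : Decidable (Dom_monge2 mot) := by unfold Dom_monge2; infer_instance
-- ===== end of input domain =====

-- B replaces A's permutation-table construction by the closed-form slice expression
-- mot[::2][::-1] + mot[1::2]; objective: simpler.

-- ===== PORT A =====
-- literal transliteration of A; 'ordre.reverse' in the Python is an attribute access
-- without a call, hence has no effect and contributes nothing here.
def monge2 (mot : String) : String :=
  let motclaire := mot.toList
  let longeur : Int := (motclaire.length : Int)
  let moitier : Int := PySem.Int.truncdiv longeur 2   -- int(longeur/2)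
  let chifre : Int := longeur
  let ordre : List Int :=
    if PySem.Int.mod longeur 2 == 1 then
      let chifre := chifre - 1
      let s := (PySem.List.pyRange 0 moitier 1).foldl
        (fun (s : List Int × Int) _ => (s.1 ++ [s.2], s.2 - 2)) (([] : List Int), chifre)
      (PySem.List.pyRange 1 (longeur + 1) 2).foldl (fun o g => o ++ [g]) s.1
    else
      let s := (PySem.List.pyRange 0 moitier 1).foldl
        (fun (s : List Int × Int) _ => (s.1 ++ [s.2], s.2 - 2)) (([] : List Int), chifre)
      (PySem.List.pyRange 1 (longeur + 1) 2).foldl (fun o g => o ++ [g]) s.1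
  let motcode : List Char := (PySem.List.pyRange 0 longeur 1).foldl
    (fun m k => m ++ [PySem.List.pyGetD motclaire (PySem.List.pyGetD ordre k 0 - 1) ' ']) []
  String.ofList motcode.reverse

-- ===== PORT B =====
def monge2_alt (mot : String) : String :=
  let l := mot.toList
  String.ofList (((PySem.List.slice? l none none 2).getD []).reverse
    ++ (PySem.List.slice? l (some 1) none 2).getD [])

-- ===== PRECONDITION & SPEC =====
def Spec_monge2 (mot : String) (out : String) : Prop := out = monge2_alt mot
instance (mot : String) (out : String) : Decidable (Spec_monge2 mot out) := by unfold Spec_monge2; infer_instance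

-- ===== CLAIM (what is proved, stated in full; the proofs are below) =====
def Claim_equal_monge2 : Prop := ∀ (mot : String), Dom_monge2 mot → Spec_monge2 mot (monge2 mot)

-- ===== LEMMAS AND PROOFS =====

-- the even-indexed elements of a list (the characters mot[::2])
def evens : List Char → List Char
  | [] => []
  | [a] => [a]
  | a :: _ :: t => a :: evens t

theorem evens_getElem? (l : List Char) (i : Nat) : (evens l)[i]? = l[2 * i]? := by
  induction l using evens.induct generalizing i with
  | case1 => simp [evens]
  | case2 a =>
      match i with
      | 0 => simp [evens]
      | i + 1 => simp [evens]
  | case3 a b t ih =>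
      match i with
      | 0 => simp [evens]
      | i + 1 =>
          have h : 2 * (i + 1) = 2 * i + 1 + 1 := by omega
          simp [evens, h, ih]

theorem evens_length (l : List Char) : (evens l).length = (l.length + 1) / 2 := by
  induction l using evens.induct <;> simp [evens, *] <;> omega

-- the descending index list [c, c-2, …] of length m built by A's first loop
def desc : Nat → Int → List Int
  | 0, _ => []
  | m + 1, c => c :: desc m (c - 2)

theorem desc_getElem? (m : Nat) (c : Int) (i : Nat) :
    (desc m c)[i]? = if i < m then some (c - 2 * i) else none := by
  induction m generalizing c i with
  | zero => simp [desc]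
  | succ m ih =>
      match i with
      | 0 => simp [desc]
      | i + 1 =>
          simp [desc, ih]
          split_ifs with h1
          · congr 1; ring
          · rfl

theorem desc_length (m : Nat) (c : Int) : (desc m c).length = m := by
  induction m generalizing c <;> simp [desc, *]

theorem fold1 (r : List Int) (o : List Int) (c : Int) :
    r.foldl (fun (s : List Int × Int) _ => (s.1 ++ [s.2], s.2 - 2)) (o, c)
      = (o ++ desc r.length c, c - 2 * r.length) := by
  induction r generalizing o c with
  | nil => simp [desc]
  | cons x t ih =>
      simp [List.foldl_cons, ih, desc]
      ring

-- a map over range n equals evens l when the function reads l at index 2*x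
theorem map_range_evens' (l : List Char) (f : Nat → Char) (n : Nat)
    (hn : n = (l.length + 1) / 2) (hf : ∀ x, 2 * x < l.length → f x = l.getD (2 * x) ' ') :
    List.map f (List.range n) = evens l := by
  subst hn
  apply List.ext_getElem?
  intro i
  simp only [List.getElem?_map, evens_getElem?]
  by_cases hi : i < (l.length + 1) / 2
  · rw [List.getElem?_range hi]
    have h2i : 2 * i < l.length := by omega
    simp [hf i h2i, List.getD_eq_getElem?_getD, List.getElem?_eq_getElem h2i]
  · rw [List.getElem?_eq_none (l := List.range _) (by simpa using hi),
      List.getElem?_eq_none (by omega)]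
    rfl

-- B side: mot[::2] is evens
theorem slice2 (l : List Char) : PySem.List.slice? l none none 2 = some (evens l) := by
  have h2 : (2 : Int) ≠ 0 := by norm_num
  simp only [PySem.List.slice?, PySem.List.sliceIndices, if_neg h2]
  norm_num
  have hcnt : (if 0 < l.length then (((l.length : Int) + 2 - 1) / 2).toNat else 0)
      = (l.length + 1) / 2 := by split_ifs <;> omega
  rw [hcnt]
  have hmem : ∀ x ∈ List.range ((l.length + 1) / 2),
      l[(2 * (x : Int)).toNat]? = some (l.getD (2 * x) ' ') := by
    intro x hx
    simp only [List.mem_range] at hx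
    have h2x : 2 * x < l.length := by omega
    have ht : (2 * (x : Int)).toNat = 2 * x := by omega
    rw [ht, List.getD_eq_getElem?_getD, List.getElem?_eq_getElem h2x]
    rfl
  rw [List.filterMap_congr hmem]
  have hfm : List.filterMap (fun x => some (l.getD (2 * x) ' '))
      (List.range ((l.length + 1) / 2))
      = List.map (fun x => l.getD (2 * x) ' ') (List.range ((l.length + 1) / 2)) :=
    List.filterMap_eq_map_iff_forall_eq_some.mpr (fun x _ => rfl)
  rw [hfm, map_range_evens' _ _ _ rfl (fun _ _ => rfl)]

-- B side: mot[1::2] is evens of the tail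
theorem slice2from1 (l : List Char) :
    PySem.List.slice? l (some 1) none 2 = some (evens l.tail) := by
  have h2 : (2 : Int) ≠ 0 := by norm_num
  simp only [PySem.List.slice?, PySem.List.sliceIndices, if_neg h2]
  norm_num
  have hcnt : (if 1 < l.length then (((l.length : Int) - min 1 (l.length : Int) + 2 - 1) / 2).toNat else 0)
      = (l.tail.length + 1) / 2 := by
    rcases l with _ | ⟨a, t⟩ <;> simp <;> split_ifs <;> simp_all <;> omega
  rw [hcnt]
  have hall : ∀ x ∈ List.range ((l.tail.length + 1) / 2),
      l[(min 1 (l.length : Int) + 2 * (x : Int)).toNat]? = some (l.tail.getD (2 * x) ' ') := by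
    intro x hx
    simp only [List.mem_range] at hx
    rcases l with _ | ⟨a, t⟩
    · simp at hx
    · have h2x : 2 * x < t.length := by simp at hx ⊢; omega
      have ht : (min 1 ((a :: t).length : Int) + 2 * (x : Int)).toNat = 2 * x + 1 := by
        simp only [List.length_cons]; push_cast; omega
      rw [ht]
      simp only [List.getElem?_cons_succ, List.tail_cons]
      rw [List.getD_eq_getElem?_getD, List.getElem?_eq_getElem h2x]
      rfl
  rw [List.filterMap_congr hall]
  have hfm : List.filterMap (fun x => some (l.tail.getD (2 * x) ' '))
      (List.range ((l.tail.length + 1) / 2))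
      = List.map (fun x => l.tail.getD (2 * x) ' ') (List.range ((l.tail.length + 1) / 2)) :=
    List.filterMap_eq_map_iff_forall_eq_some.mpr (fun x _ => rfl)
  rw [hfm, map_range_evens' _ _ _ rfl (fun _ _ => rfl)]

-- A side: the odd-numbers pass gathers the even-indexed characters in order
theorem map_g_oddrange (l : List Char) :
    List.map (fun j => PySem.List.pyGetD l (j - 1) ' ')
      (PySem.List.pyRange 1 ((l.length : Int) + 1) 2) = evens l := by
  have h2 : (2 : Int) ≠ 0 := by norm_num
  simp only [PySem.List.pyRange, if_neg h2]
  norm_num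
  apply map_range_evens'
  · split_ifs <;> omega
  · intro x hx
    simp only [Function.comp]
    have : (1 : Int) + 2 * (x : Int) - 1 = ((2 * x : Nat) : Int) := by push_cast; ring
    rw [this, PySem.List.pyGetD_natCast]

-- A side: the descending even-numbers pass gathers the odd-indexed characters in reverse
theorem map_g_desc (l : List Char) (m : Nat) (h1 : 2 * m ≤ l.length) (h2 : l.length ≤ 2 * m + 1) :
    List.map (fun j => PySem.List.pyGetD l (j - 1) ' ') (desc m (2 * (m : Int)))
      = (evens l.tail).reverse := by
  have hlen : (evens l.tail).length = m := by
    rw [evens_length, List.length_tail]; omega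
  apply List.ext_getElem?
  intro i
  simp only [List.getElem?_map, desc_getElem?]
  by_cases hi : i < m
  · rw [if_pos hi, List.getElem?_reverse (by omega), hlen, evens_getElem?, List.getElem?_tail]
    have hidx : 2 * (m - 1 - i) + 1 < l.length := by omega
    rw [List.getElem?_eq_getElem hidx]
    have harg : 2 * (m : Int) - 2 * (i : Nat) - 1 = ((2 * (m - 1 - i) + 1 : Nat) : Int) := by
      push_cast [Nat.cast_sub]; omega
    simp only [Option.map_some, harg, PySem.List.pyGetD_natCast]
    rw [List.getD_eq_getElem?_getD, List.getElem?_eq_getElem hidx]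
    rfl
  · rw [if_neg hi, List.getElem?_eq_none (by simp [hlen]; omega)]
    rfl

-- A side: the two index-building loops produce desc ++ the odd range
theorem ordre_loops (l : List Char) (c : Int) :
    ((PySem.List.pyRange 1 ((l.length : Int) + 1) 2).foldl (fun o g => o ++ [g])
      (((PySem.List.pyRange 0 ((l.length / 2 : Nat) : Int) 1).foldl
        (fun (s : List Int × Int) _ => (s.1 ++ [s.2], s.2 - 2)) (([] : List Int), c)).1))
    = desc (l.length / 2) c ++ PySem.List.pyRange 1 ((l.length : Int) + 1) 2 := by
  rw [fold1, PySem.List.foldl_append_singleton_eq_self]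
  have hl5 : (PySem.List.pyRange 0 ((l.length / 2 : Nat) : Int) 1).length = l.length / 2 := by
    rw [PySem.List.pyRange_zero_natCast]; simp
  rw [hl5]; simp

-- A side: the gather loop over ordre, reversed, is B's value
theorem core (l : List Char) (c : Int) (hc : c = 2 * ((l.length / 2 : Nat) : Int)) :
    ((PySem.List.pyRange 0 ((l.length : Int)) 1).foldl
      (fun m k => m ++ [PySem.List.pyGetD l
        (PySem.List.pyGetD (desc (l.length / 2) c ++ PySem.List.pyRange 1 ((l.length : Int) + 1) 2) k 0 - 1) ' ']) []).reverse
    = (evens l).reverse ++ evens l.tail := by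
  set ordre := desc (l.length / 2) c ++ PySem.List.pyRange 1 ((l.length : Int) + 1) 2 with hord
  have hrlen : (PySem.List.pyRange 1 ((l.length : Int) + 1) 2).length = (l.length + 1) / 2 := by
    have h2 : (2 : Int) ≠ 0 := by norm_num
    simp only [PySem.List.pyRange, if_neg h2]
    norm_num
    split_ifs <;> omega
  have hlen : ordre.length = l.length := by
    rw [hord, List.length_append, desc_length, hrlen]; omega
  rw [PySem.List.foldl_append_singleton_eq_map]
  have hmm : List.map (fun k => PySem.List.pyGetD l
        (PySem.List.pyGetD ordre k 0 - 1) ' ') (PySem.List.pyRange 0 ((l.length : Int)) 1)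
      = List.map (fun j => PySem.List.pyGetD l (j - 1) ' ')
          (List.map (fun k => PySem.List.pyGetD ordre k 0) (PySem.List.pyRange 0 ((l.length : Int)) 1)) := by
    rw [List.map_map]; rfl
  have hid : List.map (fun k => PySem.List.pyGetD ordre k 0) (PySem.List.pyRange 0 ((l.length : Int)) 1) = ordre := by
    have : ((l.length : Int)) = PySem.List.len ordre := by simp [PySem.List.len, hlen]
    rw [this]
    exact PySem.List.map_pyGetD_pyRange_zero ordre 0
  rw [hmm, hid, hord, List.map_append, map_g_oddrange, hc,
    map_g_desc _ _ (by omega) (by omega)]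
  simp

-- ===== VERDICT (by name: the statement is the Claim_ definition above) =====
theorem monge2_spec : Claim_equal_monge2 := by
  unfold Claim_equal_monge2
  intro mot _
  unfold Spec_monge2 monge2 monge2_alt
  simp only []
  have hdiv : PySem.Int.truncdiv ((mot.toList.length : Int)) 2 = ((mot.toList.length / 2 : Nat) : Int) := by
    simp [PySem.Int.truncdiv]
  have hmod : PySem.Int.mod ((mot.toList.length : Int)) 2 = ((mot.toList.length % 2 : Nat) : Int) := by
    exact_mod_cast PySem.Int.mod_natCast mot.toList.length 2
  rw [hdiv, hmod, slice2, slice2from1]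
  by_cases hpar : mot.toList.length % 2 = 1
  · have hcond : ((((mot.toList.length % 2 : Nat) : Int)) == 1) = true := by
      rw [hpar]; rfl
    rw [if_pos hcond, ordre_loops, core _ _ (by omega)]
    simp
  · have hcond : ((((mot.toList.length % 2 : Nat) : Int)) == 1) = false := by
      have h0 : mot.toList.length % 2 = 0 := by omega
      rw [h0]; rfl
    rw [if_neg (by rw [hcond]; exact Bool.false_ne_true), ordre_loops, core _ _ (by omega)]
    simp
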